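-- pv_equiv track=rewrite | github.com/nhukhang08/Source | Exercise/main.py | SO
-- ===== SOURCE A (Python) =====
-- def SO(n: int, k: int): # https://ucode.vn/problems/bai-6-day-nhi-phan-co-dung-k-so-0-co-nghia-158499
--     """
--     Kiểm tra từ 1 đến n có bao nhiêu số khi biểu diễn ở dạng nhị phân có đúng k số 0 (có nghĩa)
--
--     Ý tưởng:
--         Kiểm tra các số từ 1 đến n:
--             Chuyển *num thành số nhị phân
--             Kiểm tra số nhị phân trong *num có bao nhiêu số 0:
--             Kiểm tra nếu tổng số 0 = k:
--                 count += 1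
--         In count
--     """
--     count = 0
--     for i in range(1, n + 1):
--         binary = bin(i)[2:]
--         num0 = 0
--         for num in binary:
--             if num == '0':
--                 num0 += 1
--         if num0 == k:
--             count += 1
--     return count
-- ===== SOURCE B (Python) =====
-- def SO(n: int, k: int):
--     # Memoized divide-by-2 recursion: f(m, j) = #{1 <= x <= m : x has exactly j
--     # significant binary zeros}, split on the last bit: even x = 2y (one more zero
--     # than y), odd x = 2y+1 (same zeros as y, with x = 1 the base case).
--     memo = {}
--     def f(m, j):
--         if m <= 0 or j < 0:
--             return 0
--         key = (m, j)
--         if key not in memo: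
--             memo[key] = (1 if j == 0 else 0) + f(m // 2, j - 1) + f((m - 1) // 2, j)
--         return memo[key]
--     return f(n, k)
-- ===== Notes on version B (the rewrite author's own statement) =====
-- stated objective: faster
-- what changed: Replaced the linear scan over 1..n (converting each number to a binary string and counting its '0' characters) by a memoized divide-by-2 recursion f(m,j) = f(m//2,j-1) + f((m-1)//2,j) + [j==0], splitting the range on the last bit, which touches only O(log n * log n) states.
import Mathlib
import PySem

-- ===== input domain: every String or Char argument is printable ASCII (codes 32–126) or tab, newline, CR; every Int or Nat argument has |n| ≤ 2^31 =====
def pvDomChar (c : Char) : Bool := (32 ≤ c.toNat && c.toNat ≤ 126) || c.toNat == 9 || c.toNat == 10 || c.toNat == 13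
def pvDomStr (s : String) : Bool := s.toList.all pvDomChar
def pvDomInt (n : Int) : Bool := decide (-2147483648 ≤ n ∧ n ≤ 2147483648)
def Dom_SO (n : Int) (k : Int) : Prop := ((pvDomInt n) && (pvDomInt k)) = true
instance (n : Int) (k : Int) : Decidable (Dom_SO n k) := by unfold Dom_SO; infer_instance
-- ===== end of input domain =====

-- B replaces A's linear scan over 1..n with a memoized divide-by-2 recursion
-- on the range bound (asymptotically faster); same return value everywhere.


-- ===== PORT A =====
-- bin(i)[2:] for a positive i: binary digits, most significant first
-- (exact for i ≥ 1; A only calls it on elements of range(1, n+1)).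
def binDigits : Nat → List Char
  | 0 => []
  | m + 1 => binDigits ((m + 1) / 2) ++ [if (m + 1) % 2 = 1 then '1' else '0']

def SO (n : Int) (k : Int) : Int :=
  (PySem.List.pyRange 1 (n + 1) 1).foldl
    (fun count i =>
      let binary := binDigits i.toNat
      let num0 : Int := binary.foldl (fun a c => if c = '0' then a + 1 else a) 0
      if num0 = k then count + 1 else count)
    0

-- ===== PORT B =====
-- f(m, j) of Source B; the Python memo dict is only an evaluation cache of this
-- pure recursion and is omitted (values identical on every input).
def soRec : Nat → Int → Int
  | 0, _ => 0
  | m + 1, j =>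
    if j < 0 then 0
    else (if j = 0 then 1 else 0) + soRec ((m + 1) / 2) (j - 1) + soRec (m / 2) j
decreasing_by all_goals omega

def SO_alt (n : Int) (k : Int) : Int := soRec n.toNat k

-- ===== PRECONDITION & SPEC =====
def Spec_SO (n : Int) (k : Int) (out : Int) : Prop := out = SO_alt n k
instance (n : Int) (k : Int) (out : Int) : Decidable (Spec_SO n k out) := by unfold Spec_SO; infer_instance

-- ===== CLAIM (what is proved, stated in full; the proofs are below) =====
def Claim_equal_SO : Prop := ∀ (n : Int) (k : Int), Dom_SO n k → Spec_SO n k (SO n k)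

-- ===== LEMMAS AND PROOFS =====

-- number of '0' digits of m, as A computes it
def zc (m : Nat) : Int := (binDigits m).foldl (fun a c => if c = '0' then a + 1 else a) 0

-- A's loop, recast as a recursion on the upper bound
def F : Nat → Int → Int
  | 0, _ => 0
  | m + 1, k => F m k + (if zc (m + 1) = k then 1 else 0)

theorem foldl_zcount (l : List Char) (a : Int) :
    l.foldl (fun a c => if c = '0' then a + 1 else a) a = a + l.count '0' := by
  induction l generalizing a with
  | nil => simp
  | cons c t ih =>
    simp only [List.foldl_cons, List.count_cons, ih]
    by_cases h : c = '0'
    · simp [h]; ring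
    · simp [h]

theorem zc_nonneg (m : Nat) : 0 ≤ zc m := by
  unfold zc; rw [foldl_zcount]; positivity

theorem binDigits_pos (m : Nat) (hm : 1 ≤ m) :
    binDigits m = binDigits (m / 2) ++ [if m % 2 = 1 then '1' else '0'] := by
  obtain ⟨t, rfl⟩ : ∃ t, m = t + 1 := ⟨m - 1, by omega⟩
  rw [binDigits]

theorem zc_even (t : Nat) (ht : 1 ≤ t) : zc (2 * t) = zc t + 1 := by
  unfold zc
  rw [binDigits_pos (2 * t) (by omega)]
  have h2 : 2 * t / 2 = t := by omega
  have h3 : 2 * t % 2 = 0 := by omega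
  rw [h2, h3, foldl_zcount, foldl_zcount]
  simp

theorem zc_odd (t : Nat) : zc (2 * t + 1) = zc t := by
  unfold zc
  rw [binDigits_pos (2 * t + 1) (by omega)]
  have h2 : (2 * t + 1) / 2 = t := by omega
  have h3 : (2 * t + 1) % 2 = 1 := by omega
  rw [h2, h3, foldl_zcount, foldl_zcount]
  simp

theorem zc_one : zc 1 = 0 := by simp [zc, binDigits]

theorem F_neg (m : Nat) (k : Int) (hk : k < 0) : F m k = 0 := by
  induction m with
  | zero => rfl
  | succ t ih =>
    rw [F, ih]
    have := zc_nonneg (t + 1)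
    have : ¬ zc (t + 1) = k := by omega
    simp [this]

-- the split-on-last-bit recurrence for A's count
theorem F_rec (m : Nat) (hm : 1 ≤ m) (k : Int) :
    F m k = (if k = 0 then 1 else 0) + F (m / 2) (k - 1) + F ((m - 1) / 2) k := by
  induction m using Nat.strong_induction_on with
  | _ m ih =>
    match m, hm with
    | 1, _ =>
      show F 1 k = _
      norm_num [F, zc_one]
      by_cases h : k = 0
      · simp [h]
      · simp [h, eq_comm]
    | m + 2, _ =>
      rcases Nat.even_or_odd (m + 2) with ⟨t, ht⟩ | ⟨t, ht⟩
      · -- m + 2 = 2t, t ≥ 1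
        have ht2 : m + 2 = 2 * t := by omega
        have htpos : 1 ≤ t := by omega
        -- F (2t) k = F (2t - 1) k + ind(zc(2t) = k)
        obtain ⟨s, hs⟩ : ∃ s, m + 1 = s + 1 := ⟨m, rfl⟩
        have step : F (m + 2) k = F (m + 1) k + (if zc (m + 2) = k then 1 else 0) := by
          rw [F]
        have hm1 : m + 1 = 2 * (t - 1) + 1 := by omega
        have ihprev := ih (m + 1) (by omega) (by omega)
        rw [step, ihprev,
            show (m + 1) / 2 = t - 1 by omega, show (m + 1 - 1) / 2 = t - 1 by omega,
            show (m + 2) / 2 = t by omega, show (m + 2 - 1) / 2 = t - 1 by omega]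
        -- need: F t (k-1) = F (t-1) (k-1) + ind(zc(2t) = k)
        obtain ⟨u, hu⟩ : ∃ u, t = u + 1 := ⟨t - 1, by omega⟩
        have hF : F t (k - 1) = F (t - 1) (k - 1) + (if zc t = k - 1 then 1 else 0) := by
          subst hu; simp [F]
        have hz : zc (m + 2) = zc t + 1 := by rw [ht2]; exact zc_even t htpos
        have hiff : (zc t = k - 1) ↔ (zc (m + 2) = k) := by rw [hz]; omega
        rw [hF]
        by_cases hcase : zc t = k - 1
        · rw [if_pos hcase, if_pos (hiff.mp hcase)]; ring
        · rw [if_neg hcase, if_neg (fun h => hcase (hiff.mpr h))]; ring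
      · -- m + 2 = 2t + 1, t ≥ 1
        have ht2 : m + 2 = 2 * t + 1 := by omega
        have htpos : 1 ≤ t := by omega
        have step : F (m + 2) k = F (m + 1) k + (if zc (m + 2) = k then 1 else 0) := by
          rw [F]
        have hm1 : m + 1 = 2 * t := by omega
        have ihprev := ih (m + 1) (by omega) (by omega)
        rw [step, ihprev,
            show (m + 1) / 2 = t by omega, show (m + 1 - 1) / 2 = t - 1 by omega,
            show (m + 2) / 2 = t by omega, show (m + 2 - 1) / 2 = t by omega]
        -- need: F t k = F (t-1) k + ind(zc(2t+1) = k)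
        obtain ⟨u, hu⟩ : ∃ u, t = u + 1 := ⟨t - 1, by omega⟩
        have hF : F t k = F (t - 1) k + (if zc t = k then 1 else 0) := by
          subst hu; simp [F]
        have hz : zc (m + 2) = zc t := by rw [ht2]; exact zc_odd t
        rw [hF, hz]
        ring

theorem F_eq_soRec (m : Nat) (k : Int) : F m k = soRec m k := by
  induction m using Nat.strong_induction_on generalizing k with
  | _ m ih =>
    match m with
    | 0 => simp [F, soRec]
    | m + 1 =>
      rw [soRec]
      by_cases hk : k < 0
      · simp [hk, F_neg _ _ hk]
      · simp only [hk, if_false]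
        rw [← ih ((m + 1) / 2) (by omega), ← ih (m / 2) (by omega)]
        exact F_rec (m + 1) (by omega) k

-- A's foldl over range(1, n+1) is F n.toNat
theorem SO_eq_F (n : Int) (k : Int) : SO n k = F n.toNat k := by
  unfold SO
  by_cases hn : n ≤ 0
  · rw [PySem.List.pyRange_one_eq_nil (by omega)]
    have : n.toNat = 0 := by omega
    rw [this]; rfl
  · obtain ⟨m, hm⟩ : ∃ m : Nat, n = (m : Int) := ⟨n.toNat, by omega⟩
    subst hm
    rw [Int.toNat_natCast]
    induction m with
    | zero => simp at hn
    | succ t iht =>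
      rw [show ((t + 1 : Nat) : Int) + 1 = ((t : Int) + 1) + 1 by push_cast; ring,
          PySem.List.pyRange_one_succ_right (by omega), List.foldl_append]
      rcases Nat.eq_zero_or_pos t with h0 | hpos
      · subst h0
        rw [show PySem.List.pyRange 1 (((0 : Nat) : Int) + 1) 1 = [] from
              PySem.List.pyRange_one_eq_nil (by omega)]
        simp only [List.foldl_nil, List.foldl_cons, F]
        rw [show (((0 : Nat) : Int) + 1).toNat = 1 by decide]
        simp [zc]
      · rw [iht (by omega)]
        simp only [F, List.foldl_cons, List.foldl_nil]
        rw [show (((t : Nat) : Int) + 1).toNat = t + 1 by omega]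
        simp only [zc]
        split_ifs <;> simp

-- ===== VERDICT (by name: the statement is the Claim_ definition above) =====
theorem SO_spec : Claim_equal_SO := by
  intro n k _
  show SO n k = SO_alt n k
  rw [SO_eq_F, F_eq_soRec]; rfl
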